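-- pv_equiv track=rewrite | github.com/0xJJphy/alt-scraper | spot_scraper.py | _select_best_narrative
-- ===== SOURCE A (Python) =====
-- from typing import List, Dict, Optional
--
-- def _select_best_narrative(categories: List[str]) -> str:
--     """Pick the most significant narrative from a list of categories."""
--     if not categories:
--         return "Unknown"
--
--     # Preference: Specific sectors > Generic L1/L2 > Ecosystems
--     # 1. Look for specific sectors (excluding generic terms)
--     generic_terms = ["Ecosystem", "Standard", "Portfolio", "Asset-Backed", "Wrapped", "Index", "SEC Securities", "Alleged", "FTX Holdings", "Multicoin Capital", "Alameda Research", "GMCI", "Proof of", "Made in", "CoinList", "Launchpad", "Research", "Ventures", "Capital"]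
--     specific = [c for c in categories if not any(x in c for x in generic_terms)]
--
--     if specific:
--         # Prefer sectors that are not just "Layer 1" or "Smart Contract Platform" if others exist
--         detailed = [c for c in specific if c not in ["Layer 1 (L1)", "Layer 2 (L2)", "Smart Contract Platform"]]
--         if detailed:
--             return detailed[0]
--         return specific[0]
--
--     return categories[0]
-- ===== SOURCE B (Python) =====
-- from typing import List
--
-- def _select_best_narrative(categories: List[str]) -> str:
--     """Pick the most significant narrative from a list of categories (single pass)."""
--     if not categories:
--         return "Unknown"
--     generic_terms = ["Ecosystem", "Standard", "Portfolio", "Asset-Backed", "Wrapped", "Index", "SEC Securities", "Alleged", "FTX Holdings", "Multicoin Capital", "Alameda Research", "GMCI", "Proof of", "Made in", "CoinList", "Launchpad", "Research", "Ventures", "Capital"]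
--     first_specific = None
--     for c in categories:
--         if any(x in c for x in generic_terms):
--             continue
--         if first_specific is None:
--             first_specific = c
--         if c not in ["Layer 1 (L1)", "Layer 2 (L2)", "Smart Contract Platform"]:
--             return c
--     return first_specific if first_specific is not None else categories[0]
-- ===== Notes on version B (the rewrite author's own statement) =====
-- stated objective: faster
-- what changed: Replaces A's two list comprehensions (building the full 'specific' and 'detailed' lists and then indexing them) by a single early-returning pass over categories that keeps only a first-specific sentinel.
import Mathlib
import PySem

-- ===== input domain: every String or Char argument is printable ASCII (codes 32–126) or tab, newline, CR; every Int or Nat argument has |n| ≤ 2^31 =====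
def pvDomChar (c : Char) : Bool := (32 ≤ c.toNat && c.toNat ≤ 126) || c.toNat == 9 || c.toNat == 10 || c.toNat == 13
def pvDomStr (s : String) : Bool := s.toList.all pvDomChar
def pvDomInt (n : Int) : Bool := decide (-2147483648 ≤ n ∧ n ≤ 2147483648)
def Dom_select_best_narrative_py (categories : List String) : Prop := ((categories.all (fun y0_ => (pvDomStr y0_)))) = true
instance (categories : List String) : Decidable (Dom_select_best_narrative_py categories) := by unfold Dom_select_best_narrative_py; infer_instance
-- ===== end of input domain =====

-- B replaces A's two list comprehensions by a single early-returning pass with a first-specific sentinel (objective: alternative).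

-- ===== PORT A =====
def pvGenericTerms : List String := ["Ecosystem", "Standard", "Portfolio", "Asset-Backed", "Wrapped", "Index", "SEC Securities", "Alleged", "FTX Holdings", "Multicoin Capital", "Alameda Research", "GMCI", "Proof of", "Made in", "CoinList", "Launchpad", "Research", "Ventures", "Capital"]

def pvIsGeneric (c : String) : Bool := pvGenericTerms.any (fun x => PySem.Str.isIn x c)

def pvExcluded (c : String) : Bool := ["Layer 1 (L1)", "Layer 2 (L2)", "Smart Contract Platform"].contains c

def select_best_narrative_py (categories : List String) : String :=
  match categories with
  | [] => "Unknown"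
  | c0 :: _ =>
    let specific := categories.filter (fun c => ! pvIsGeneric c)
    if !specific.isEmpty then
      let detailed := specific.filter (fun c => ! pvExcluded c)
      if !detailed.isEmpty then detailed.headD "" else specific.headD ""
    else c0

-- ===== PORT B =====
def pvAltLoop (cs : List String) (first : Option String) (c0 : String) : String :=
  match cs with
  | [] => first.getD c0
  | c :: rest =>
    if pvIsGeneric c then pvAltLoop rest first c0
    else
      let first' := some (first.getD c)
      if ! pvExcluded c then c else pvAltLoop rest first' c0

def select_best_narrative_py_alt (categories : List String) : String :=
  match categories with
  | [] => "Unknown"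
  | c0 :: _ => pvAltLoop categories none c0

-- ===== PRECONDITION & SPEC =====
def Spec_select_best_narrative_py (categories : List String) (out : String) : Prop := out = select_best_narrative_py_alt categories
instance (categories : List String) (out : String) : Decidable (Spec_select_best_narrative_py categories out) := by unfold Spec_select_best_narrative_py; infer_instance

-- ===== CLAIM (what is proved, stated in full; the proofs are below) =====
def Claim_equal_select_best_narrative_py : Prop := ∀ (categories : List String), Dom_select_best_narrative_py categories → Spec_select_best_narrative_py categories (select_best_narrative_py categories)

-- ===== LEMMAS AND PROOFS =====
lemma pvAltLoop_eq (cs : List String) (first : Option String) (c0 : String) :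
    pvAltLoop cs first c0 =
      (((cs.filter (fun c => ! pvIsGeneric c)).filter (fun c => ! pvExcluded c)).head?).getD
        (first.getD ((cs.filter (fun c => ! pvIsGeneric c)).headD c0)) := by
  induction cs generalizing first with
  | nil => simp [pvAltLoop]
  | cons c rest ih =>
    simp only [pvAltLoop, List.filter_cons]
    by_cases hg : pvIsGeneric c
    · simp [hg, ih]
    · by_cases he : pvExcluded c
      · simp [hg, he, ih]
      · simp [hg, he]

theorem pv_main (categories : List String) :
    select_best_narrative_py categories = select_best_narrative_py_alt categories := by
  match categories with
  | [] => rfl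
  | c0 :: rest =>
    simp only [select_best_narrative_py, select_best_narrative_py_alt, pvAltLoop_eq]
    set spec := (c0 :: rest).filter (fun c => ! pvIsGeneric c) with hspec
    set det := spec.filter (fun c => ! pvExcluded c) with hdet
    by_cases hs : spec.isEmpty
    · have hd : det = [] := by
        rw [hdet, List.isEmpty_iff.mp hs]; rfl
      simp [hd, List.isEmpty_iff.mp hs]
    · by_cases hdE : det.isEmpty
      · have hd : det = [] := List.isEmpty_iff.mp hdE
        rcases List.exists_cons_of_ne_nil (by simpa [List.isEmpty_iff] using hs) with ⟨a, t, ha⟩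
        simp [hs, hd, ha]
      · rcases List.exists_cons_of_ne_nil (by simpa [List.isEmpty_iff] using hdE) with ⟨a, t, ha⟩
        simp [hs, ha]

-- ===== VERDICT (by name: the statement is the Claim_ definition above) =====
theorem select_best_narrative_py_spec : Claim_equal_select_best_narrative_py := by
  intro categories _
  exact pv_main categories
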